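-- pv_equiv track=rewrite | github.com/thevibethinker/n5os-ode | Skills/meeting-ingestion/scripts/pocket_adapter.py | normalize_transcript_md
-- ===== SOURCE A (Python) =====
-- def normalize_transcript_md(transcript_entries: list) -> str:
--     """Convert Pocket transcript array to readable markdown."""
--     lines = []
--     current_speaker = None
--
--     for entry in transcript_entries:
--         speaker = entry.get("speaker", "Unknown")
--         text = entry.get("text", "").strip()
--         if not text:
--             continue
--
--         if speaker != current_speaker:
--             if lines:
--                 lines.append("")
--             lines.append(f"**{speaker}:**")
--             current_speaker = speaker
--
--         lines.append(text)
--
--     return "\n".join(lines)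
-- ===== SOURCE B (Python) =====
-- def normalize_transcript_md(transcript_entries: list) -> str:
--     """Convert Pocket transcript array to readable markdown.
--
--     Pipeline decomposition: normalize entries to (speaker, stripped_text)
--     pairs, drop empty texts, split the pairs into consecutive same-speaker
--     runs, render each run as one block, and join blocks with blank lines.
--     """
--     pairs = [(e.get("speaker", "Unknown"), e.get("text", "").strip())
--              for e in transcript_entries]
--     pairs = [p for p in pairs if p[1]]
--
--     def blocks(ps):
--         if not ps:
--             return []
--         spk = ps[0][0]
--         i = 1
--         while i < len(ps) and ps[i][0] == spk:
--             i += 1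
--         block = "**%s:**\n" % spk + "\n".join(t for _, t in ps[:i])
--         return [block] + blocks(ps[i:])
--
--     return "\n\n".join(blocks(pairs))
-- ===== Notes on version B (the rewrite author's own statement) =====
-- stated objective: idiomatic
-- what changed: A's single stateful loop (current-speaker register deciding when to emit a blank line and a header) is replaced by a pipeline: map entries to (speaker, stripped-text) pairs, filter out empty texts, split into consecutive same-speaker runs, render each run as one '**speaker:**' block, and join blocks with blank lines.
import Mathlib
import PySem

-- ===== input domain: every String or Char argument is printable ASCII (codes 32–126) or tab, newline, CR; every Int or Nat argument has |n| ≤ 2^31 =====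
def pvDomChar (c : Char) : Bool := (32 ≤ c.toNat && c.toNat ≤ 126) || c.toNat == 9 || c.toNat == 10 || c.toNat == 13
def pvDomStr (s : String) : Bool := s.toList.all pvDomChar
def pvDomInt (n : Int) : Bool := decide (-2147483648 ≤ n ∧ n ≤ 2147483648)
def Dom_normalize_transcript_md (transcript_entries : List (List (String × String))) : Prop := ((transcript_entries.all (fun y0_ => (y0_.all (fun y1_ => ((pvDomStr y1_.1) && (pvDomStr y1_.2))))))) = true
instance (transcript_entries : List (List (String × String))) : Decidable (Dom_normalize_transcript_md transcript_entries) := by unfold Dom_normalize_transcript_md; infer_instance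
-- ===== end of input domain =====

-- B replaces A's single stateful loop (current-speaker register + conditional blank line) by an
-- idiomatic pipeline: map/filter to (speaker, text) pairs, group consecutive same-speaker runs,
-- render each run as a block, join blocks with "\n\n".  Objective: idiomatic; same cost.

-- ===== PORT A =====
-- entry.get(k, dflt): first-match lookup in the association list
def pvEntryGet (e : List (String × String)) (k dflt : String) : String :=
  PySem.Dict.getD (PySem.Dict.mk e) k dflt

-- one iteration of A's for-loop over state (lines, current_speaker)
def pvStepA (st : List String × Option String) (entry : List (String × String)) :
    List String × Option String :=
  let speaker := pvEntryGet entry "speaker" "Unknown"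
  let text := PySem.Str.strip (pvEntryGet entry "text" "")
  if text = "" then st
  else
    let st' :=
      if some speaker ≠ st.2 then
        ((if st.1 ≠ [] then st.1 ++ [""] else st.1) ++ ["**" ++ speaker ++ ":**"], some speaker)
      else st
    (st'.1 ++ [text], st'.2)

def normalize_transcript_md (transcript_entries : List (List (String × String))) : String :=
  PySem.Str.join "\n" (transcript_entries.foldl pvStepA ([], none)).1

-- ===== PORT B =====
-- blocks(ps): peel off the leading run of ps[0]'s speaker (the while loop = takeWhile/dropWhile
-- on the tail), render it, recurse on the rest
def pvBlocks : List (String × String) → List String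
  | [] => []
  | (spk, t) :: rest =>
    let run := rest.takeWhile (fun p => p.1 == spk)
    let rest' := rest.dropWhile (fun p => p.1 == spk)
    ("**" ++ spk ++ ":**\n" ++ PySem.Str.join "\n" (t :: run.map Prod.snd)) :: pvBlocks rest'
  termination_by ps => ps.length
  decreasing_by
    simp only [List.length_cons]
    exact Nat.lt_succ_of_le (List.length_dropWhile_le _ _)

def normalize_transcript_md_alt (transcript_entries : List (List (String × String))) : String :=
  let pairs := transcript_entries.map
    (fun e => (pvEntryGet e "speaker" "Unknown", PySem.Str.strip (pvEntryGet e "text" "")))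
  let pairs := pairs.filter (fun p => p.2 ≠ "")
  PySem.Str.join "\n\n" (pvBlocks pairs)

-- ===== PRECONDITION & SPEC =====
def Spec_normalize_transcript_md (transcript_entries : List (List (String × String))) (out : String) : Prop := out = normalize_transcript_md_alt transcript_entries
instance (transcript_entries : List (List (String × String))) (out : String) : Decidable (Spec_normalize_transcript_md transcript_entries out) := by unfold Spec_normalize_transcript_md; infer_instance

-- ===== CLAIM (what is proved, stated in full; the proofs are below) =====
def Claim_equal_normalize_transcript_md : Prop := ∀ (transcript_entries : List (List (String × String))), Dom_normalize_transcript_md transcript_entries → Spec_normalize_transcript_md transcript_entries (normalize_transcript_md transcript_entries)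

-- ===== LEMMAS AND PROOFS =====

-- A's loop body on a non-skipped pair, as a function of the pair
def pvStepP (st : List String × Option String) (p : String × String) :
    List String × Option String :=
  let st' :=
    if some p.1 ≠ st.2 then
      ((if st.1 ≠ [] then st.1 ++ [""] else st.1) ++ ["**" ++ p.1 ++ ":**"], some p.1)
    else st
  (st'.1 ++ [p.2], st'.2)

-- the non-empty (speaker, stripped text) pairs, as B computes them
def pvPairs (ts : List (List (String × String))) : List (String × String) :=
  (ts.map (fun e => (pvEntryGet e "speaker" "Unknown",
                     PySem.Str.strip (pvEntryGet e "text" "")))).filter (fun p => p.2 ≠ "")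

-- A's lines after a first header, current speaker c
def pvG : List (String × String) → String → List String
  | [], _ => []
  | (s, t) :: r, c => (if s = c then [t] else ["", "**" ++ s ++ ":**", t]) ++ pvG r s

def pvLastSpk : List (String × String) → String → String
  | [], c => c
  | (s, _) :: r, _ => pvLastSpk r s

-- the common rendered tail (everything after the first header and first text)
def pvH : List (String × String) → String → String
  | [], _ => ""
  | (s, t) :: r, c =>
    (if s = c then "\n" ++ t else "\n\n" ++ "**" ++ s ++ ":**" ++ "\n" ++ t) ++ pvH r s

def pvRunTail : List (String × String) → String
  | [] => ""
  | (_, t) :: r => "\n" ++ t ++ pvRunTail r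

def pvTail (ps : List (String × String)) : String :=
  if ps = [] then "" else "\n\n" ++ PySem.Str.join "\n\n" (pvBlocks ps)

lemma str_ext {s t : String} (h : s.toList = t.toList) : s = t := by
  simpa using congrArg String.ofList h

lemma str_join_nil (sep : String) : PySem.Str.join sep [] = "" := by
  simp [PySem.Str.join, PySem.Chars.join_nil]

lemma str_join_singleton (sep p : String) : PySem.Str.join sep [p] = p := by
  simp [PySem.Str.join]

lemma str_join_cons_cons (sep p q : String) (rest : List String) :
    PySem.Str.join sep (p :: q :: rest) = p ++ sep ++ PySem.Str.join sep (q :: rest) := by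
  apply str_ext
  simp [PySem.Str.join, PySem.Chars.join_cons_cons]

lemma stepA_eq (st : List String × Option String) (e : List (String × String)) :
    pvStepA st e =
      (if PySem.Str.strip (pvEntryGet e "text" "") = "" then st
       else pvStepP st (pvEntryGet e "speaker" "Unknown", PySem.Str.strip (pvEntryGet e "text" ""))) := by
  simp only [pvStepA, pvStepP]

lemma foldl_filter (ts : List (List (String × String))) (st : List String × Option String) :
    ts.foldl pvStepA st = (pvPairs ts).foldl pvStepP st := by
  induction ts generalizing st with
  | nil => rfl
  | cons e ts ih =>
    simp only [List.foldl_cons, pvPairs, List.map_cons, List.filter_cons] at *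
    rw [stepA_eq]
    by_cases h : PySem.Str.strip (pvEntryGet e "text" "") = ""
    · simp [h, ih]
    · simp [h, ih]

lemma foldl_stepP (ps : List (String × String)) (l : List String) (c : String) (hl : l ≠ []) :
    ps.foldl pvStepP (l, some c) = (l ++ pvG ps c, some (pvLastSpk ps c)) := by
  induction ps generalizing l c with
  | nil => simp [pvG, pvLastSpk]
  | cons p r ih =>
    obtain ⟨s, t⟩ := p
    rw [List.foldl_cons]
    by_cases hs : s = c
    · subst hs
      rw [show pvStepP (l, some s) (s, t) = (l ++ [t], some s) from by simp [pvStepP]]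
      rw [ih _ _ (by simp)]
      simp [pvG, pvLastSpk, List.append_assoc]
    · rw [show pvStepP (l, some c) (s, t)
            = (l ++ [""] ++ ["**" ++ s ++ ":**"] ++ [t], some s) from by
          simp [pvStepP, hs, hl]]
      rw [ih _ _ (by simp)]
      simp [pvG, pvLastSpk, hs, List.append_assoc]

lemma joinG (ps : List (String × String)) (c : String) (x : String) :
    PySem.Str.join "\n" (x :: pvG ps c) = x ++ pvH ps c := by
  induction ps generalizing c x with
  | nil =>
    apply str_ext
    simp [pvG, pvH, str_join_singleton]
  | cons p r ih =>
    obtain ⟨s, t⟩ := p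
    by_cases hs : s = c
    · subst hs
      have hg : pvG ((s, t) :: r) s = t :: pvG r s := by simp [pvG]
      have hh : pvH ((s, t) :: r) s = ("\n" ++ t) ++ pvH r s := by simp [pvH]
      rw [hg, hh, str_join_cons_cons, ih]
      apply str_ext
      simp
    · have hg : pvG ((s, t) :: r) c = "" :: ("**" ++ s ++ ":**") :: t :: pvG r s := by
        simp [pvG, hs]
      have hh : pvH ((s, t) :: r) c = ("\n\n" ++ "**" ++ s ++ ":**" ++ "\n" ++ t) ++ pvH r s := by
        simp [pvH, hs]
      rw [hg, hh, str_join_cons_cons, str_join_cons_cons, str_join_cons_cons, ih]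
      apply str_ext
      simp

lemma runTail (run : List (String × String)) (t : String) :
    PySem.Str.join "\n" (t :: run.map Prod.snd) = t ++ pvRunTail run := by
  induction run generalizing t with
  | nil => simp [pvRunTail, str_join_singleton]
  | cons p r ih =>
    obtain ⟨a, b⟩ := p
    simp only [pvRunTail, List.map_cons]
    rw [str_join_cons_cons, ih]
    apply str_ext
    simp

lemma blocks_cons (s t : String) (r : List (String × String)) :
    PySem.Str.join "\n\n" (pvBlocks ((s, t) :: r)) =
      "**" ++ s ++ ":**" ++ "\n" ++ t
        ++ (pvRunTail (r.takeWhile (fun p => p.1 == s)) ++ pvTail (r.dropWhile (fun p => p.1 == s))) := by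
  rw [pvBlocks]
  rcases h : r.dropWhile (fun p => p.1 == s) with _ | ⟨⟨a, b⟩, qs⟩
  · simp only [h, pvBlocks, pvTail, if_pos]
    rw [str_join_singleton, runTail]
    apply str_ext
    simp
  · simp only [h, pvBlocks]
    rw [str_join_cons_cons, runTail, pvTail, if_neg (by simp), pvBlocks]
    apply str_ext
    simp

lemma tail_eq_H (ps : List (String × String)) (c : String) :
    pvRunTail (ps.takeWhile (fun p => p.1 == c)) ++ pvTail (ps.dropWhile (fun p => p.1 == c)) =
      pvH ps c := by
  induction ps generalizing c with
  | nil =>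
    apply str_ext
    simp [pvRunTail, pvTail, pvH]
  | cons p r ih =>
    obtain ⟨s, t⟩ := p
    by_cases hs : s = c
    · subst hs
      simp only [List.takeWhile_cons, List.dropWhile_cons, beq_self_eq_true, if_pos, pvRunTail, pvH]
      rw [← ih s]
      apply str_ext
      simp
    · have hb : ((s, t).1 == c) = false := by simpa using hs
      rw [show List.takeWhile (fun p => p.1 == c) ((s, t) :: r) = [] from by
            simp [hb],
          show List.dropWhile (fun p => p.1 == c) ((s, t) :: r) = (s, t) :: r from by
            simp [hb],
          show pvH ((s, t) :: r) c = ("\n\n" ++ "**" ++ s ++ ":**" ++ "\n" ++ t) ++ pvH r s from by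
            simp [pvH, hs]]
      rw [pvTail, if_neg (by simp), blocks_cons, ih s]
      apply str_ext
      simp [pvRunTail]

lemma main_pairs (ps : List (String × String)) :
    PySem.Str.join "\n" ((ps.foldl pvStepP (([] : List String), (none : Option String))).1) =
      PySem.Str.join "\n\n" (pvBlocks ps) := by
  rcases ps with _ | ⟨⟨s, t⟩, r⟩
  · simp [pvBlocks, str_join_nil]
  · have h1 : pvStepP (([] : List String), (none : Option String)) (s, t) =
        (["**" ++ s ++ ":**", t], some s) := by
      simp [pvStepP]
    rw [List.foldl_cons, h1, foldl_stepP r _ s (by simp)]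
    simp only [List.cons_append, List.nil_append]
    rw [str_join_cons_cons, joinG, blocks_cons, tail_eq_H]
    apply str_ext
    simp

-- ===== VERDICT (by name: the statement is the Claim_ definition above) =====
theorem normalize_transcript_md_spec : Claim_equal_normalize_transcript_md := by
  intro ts _
  unfold Spec_normalize_transcript_md normalize_transcript_md normalize_transcript_md_alt
  rw [foldl_filter]
  exact main_pairs (pvPairs ts)
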